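-- pv_equiv track=rewrite | github.com/wilmurillo-ai/Design-Assistant | .skills/openclaw-skills/skills/stoneyhoo/lobsterai-security/code_scanner.py | _calculate_threat_level
-- ===== SOURCE A (Python) =====
-- from typing import Dict, List, Tuple, Optional, Set, Any
--
-- def _calculate_threat_level(issues: List[Dict[str, Any]]) -> str:
--     """计算总体威胁等级"""
--     if not issues:
--         return 'safe'
--
--     severities = [issue['severity'] for issue in issues]
--     severity_order = {'critical': 4, 'high': 3, 'medium': 2, 'low': 1}
--
--     max_severity = max(severities, key=lambda s: severity_order.get(s, 0))
--
--     # 如果有多个 critical，保持 critical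
--     if severities.count('critical') >= 2:
--         return 'critical'
--     if 'critical' in severities:
--         return 'critical'
--     if 'high' in severities:
--         return 'high'
--
--     return max_severity
-- ===== SOURCE B (Python) =====
-- def _calculate_threat_level(issues):
--     if not issues:
--         return 'safe'
--     severities = [issue['severity'] for issue in issues]
--     for level in ('critical', 'high', 'medium', 'low'):
--         if level in severities:
--             return level
--     return severities[0]
-- ===== Notes on version B (the rewrite author's own statement) =====
-- stated objective: simpler
-- what changed: B drops the max-with-key computation and the redundant critical-count branch entirely: it scans the fixed severity ladder critical>high>medium>low and returns the first level present, falling back to the first severity when no known level occurs (all ranks tie at 0, where max returns the first element).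
import Mathlib
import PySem

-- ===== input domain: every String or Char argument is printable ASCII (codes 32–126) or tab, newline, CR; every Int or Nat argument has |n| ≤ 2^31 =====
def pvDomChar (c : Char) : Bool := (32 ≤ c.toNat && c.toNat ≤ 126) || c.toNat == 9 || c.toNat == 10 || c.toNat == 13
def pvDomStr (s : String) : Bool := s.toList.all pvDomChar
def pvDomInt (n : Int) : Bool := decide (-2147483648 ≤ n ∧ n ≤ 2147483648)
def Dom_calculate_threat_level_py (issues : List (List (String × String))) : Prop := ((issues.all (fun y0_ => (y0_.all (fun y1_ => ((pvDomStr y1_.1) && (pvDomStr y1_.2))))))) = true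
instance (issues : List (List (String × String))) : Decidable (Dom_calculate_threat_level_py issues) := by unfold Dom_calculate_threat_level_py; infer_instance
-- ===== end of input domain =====

-- B drops A's max-with-key computation and its redundant critical-count / membership branches:
-- it scans the fixed severity ladder critical>high>medium>low for the first level present,
-- falling back to the first severity when none occurs (objective: simpler).


-- ===== PORT A =====
-- severity_order = {'critical': 4, 'high': 3, 'medium': 2, 'low': 1}
def sevOrder : PySem.Dict String Int :=
  PySem.Dict.mk [("critical", 4), ("high", 3), ("medium", 2), ("low", 1)]

-- lambda s: severity_order.get(s, 0)
def sevKey (s : String) : Int := PySem.Dict.getD sevOrder s 0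

-- issue['severity']: Python raises KeyError when the key is missing; Pre_ excludes that,
-- so the getD default "" is never reached on admitted inputs.
def calculate_threat_level_py (issues : List (List (String × String))) : String :=
  if issues = [] then "safe"
  else
    let severities := issues.map (fun issue => PySem.Dict.getD (PySem.Dict.mk issue) "severity" "")
    let max_severity := (PySem.List.max? severities sevKey).getD ""
    if severities.count "critical" ≥ 2 then "critical"
    else if severities.contains "critical" then "critical"
    else if severities.contains "high" then "high"
    else max_severity

-- ===== PORT B =====
-- for level in ('critical', 'high', 'medium', 'low'): if level in severities: return level
def sevLadder : List String := ["critical", "high", "medium", "low"]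

def calculate_threat_level_py_alt (issues : List (List (String × String))) : String :=
  if issues = [] then "safe"
  else
    let severities := issues.map (fun issue => PySem.Dict.getD (PySem.Dict.mk issue) "severity" "")
    match sevLadder.find? (fun level => severities.contains level) with
    | some level => level
    -- severities[0]: severities is nonempty here, so the default "" is never reached
    | none => (PySem.List.pyGet? severities 0).getD ""

-- ===== PRECONDITION & SPEC =====
-- Pre_ excludes exactly the inputs where A raises KeyError: some issue lacks a 'severity' key.
def Pre_calculate_threat_level_py (issues : List (List (String × String))) : Prop :=
  issues.all (fun issue => (PySem.Dict.get? (PySem.Dict.mk issue) "severity").isSome) = true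
instance (issues : List (List (String × String))) : Decidable (Pre_calculate_threat_level_py issues) := by unfold Pre_calculate_threat_level_py; infer_instance
def pvWitness_calculate_threat_level_py : (List (List (String × String))) :=
  [[("severity", "high")], [("severity", "low"), ("id", "x")]]

def Spec_calculate_threat_level_py (issues : List (List (String × String))) (out : String) : Prop := out = calculate_threat_level_py_alt issues
instance (issues : List (List (String × String))) (out : String) : Decidable (Spec_calculate_threat_level_py issues out) := by unfold Spec_calculate_threat_level_py; infer_instance

-- ===== CLAIM (what is proved, stated in full; the proofs are below) =====
def Claim_equal_calculate_threat_level_py : Prop := ∀ (issues : List (List (String × String))), Dom_calculate_threat_level_py issues → Pre_calculate_threat_level_py issues → Spec_calculate_threat_level_py issues (calculate_threat_level_py issues)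

-- ===== LEMMAS AND PROOFS =====

lemma sevKey_cases (s : String) :
    sevKey s = if "critical" = s then 4 else if "high" = s then 3
      else if "medium" = s then 2 else if "low" = s then 1 else 0 := by
  simp only [sevKey, sevOrder, PySem.Dict.getD, PySem.Dict.get?_mk_cons, beq_iff_eq]
  split_ifs <;> rfl

lemma sevKey_of_unknown {s : String} (h1 : s ≠ "critical") (h2 : s ≠ "high")
    (h3 : s ≠ "medium") (h4 : s ≠ "low") : sevKey s = 0 := by
  rw [sevKey_cases]; split_ifs <;> simp_all

lemma sevKey_eq_two {s : String} (h : sevKey s = 2) : s = "medium" := by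
  rw [sevKey_cases] at h; split_ifs at h <;> simp_all

lemma sevKey_eq_one {s : String} (h : sevKey s = 1) : s = "low" := by
  rw [sevKey_cases] at h; split_ifs at h <;> simp_all

-- if level L ∈ xs and nothing in xs out-ranks L, the first max is L itself
lemma max?_eq_level {xs : List String} {m L : String}
    (hm : PySem.List.max? xs sevKey = some m) (hL : L ∈ xs)
    (hub : ∀ y ∈ xs, sevKey y ≤ sevKey L)
    (huniq : ∀ s : String, sevKey s = sevKey L → s = L) : m = L := by
  have h1 : sevKey L ≤ sevKey m := PySem.List.max?_isMax hm _ hL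
  have h2 : sevKey m ≤ sevKey L := hub _ (PySem.List.max?_mem hm)
  exact huniq m (le_antisymm h2 h1)

-- a fold whose step fixes the accumulator keeps it
lemma foldl_keep {α β : Type} (f : Option α → β → Option α) (v : α) (t : List β)
    (hf : ∀ x ∈ t, f (some v) x = some v) : t.foldl f (some v) = some v := by
  induction t with
  | nil => rfl
  | cons x s ih =>
    simp only [List.foldl_cons, hf x List.mem_cons_self]
    exact ih (fun y hy => hf y (List.mem_cons_of_mem _ hy))

lemma max?_eq_head?_of_zero {xs : List String}
    (h : ∀ x ∈ xs, sevKey x = 0) : PySem.List.max? xs sevKey = xs.head? := by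
  cases xs with
  | nil => rfl
  | cons a t =>
    simp only [PySem.List.max?, List.foldl_cons, List.head?]
    apply foldl_keep
    intro x hx
    show (if sevKey a < sevKey x then some x else some a) = some a
    rw [h a List.mem_cons_self, h x (List.mem_cons_of_mem _ hx)]
    simp

-- ===== VERDICT (by name: the statement is the Claim_ definition above) =====
theorem calculate_threat_level_py_spec : Claim_equal_calculate_threat_level_py := by
  intro issues _ _
  unfold Spec_calculate_threat_level_py calculate_threat_level_py calculate_threat_level_py_alt
  by_cases hnil : issues = []
  · simp [hnil]
  · simp only [hnil, if_false]
    set sevs := issues.map (fun issue => PySem.Dict.getD (PySem.Dict.mk issue) "severity" "") with hsevs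
    have hne : sevs ≠ [] := by simp [hsevs, hnil]
    obtain ⟨m, hm⟩ : ∃ m, PySem.List.max? sevs sevKey = some m := by
      cases h : PySem.List.max? sevs sevKey with
      | none => exact absurd ((PySem.List.max?_eq_none_iff _ _).mp h) hne
      | some m => exact ⟨m, rfl⟩
    by_cases hc : "critical" ∈ sevs
    · by_cases h2 : sevs.count "critical" ≥ 2 <;>
        simp [sevLadder, hc, h2]
    · have hcc : ¬ sevs.count "critical" ≥ 2 := by
        simp [List.count_eq_zero_of_not_mem hc]
      by_cases hh : "high" ∈ sevs
      · simp [sevLadder, List.find?, hc, hh, hcc]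
      · simp only [hcc, if_false, hm, Option.getD_some]
        by_cases hmed : "medium" ∈ sevs
        · have hub : ∀ y ∈ sevs, sevKey y ≤ sevKey "medium" := by
            intro y hy
            rw [sevKey_cases]
            by_cases y1 : "critical" = y
            · exact absurd (y1 ▸ hy) hc
            by_cases y2 : "high" = y
            · exact absurd (y2 ▸ hy) hh
            simp only [y1, y2, if_false]
            split_ifs <;> simp [sevKey_cases]
          have hmm : m = "medium" := max?_eq_level hm hmed hub
            (fun s hs => sevKey_eq_two (by simpa [sevKey_cases] using hs))
          simp [sevLadder, List.find?, hc, hh, hmed, hmm]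
        · by_cases hlow : "low" ∈ sevs
          · have hub : ∀ y ∈ sevs, sevKey y ≤ sevKey "low" := by
              intro y hy
              rw [sevKey_cases]
              by_cases y1 : "critical" = y
              · exact absurd (y1 ▸ hy) hc
              by_cases y2 : "high" = y
              · exact absurd (y2 ▸ hy) hh
              by_cases y3 : "medium" = y
              · exact absurd (y3 ▸ hy) hmed
              simp only [y1, y2, y3, if_false]
              split_ifs <;> simp [sevKey_cases]
            have hmm : m = "low" := max?_eq_level hm hlow hub
              (fun s hs => sevKey_eq_one (by simpa [sevKey_cases] using hs))
            simp [sevLadder, List.find?, hc, hh, hmed, hlow, hmm]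
          · have hz : ∀ x ∈ sevs, sevKey x = 0 := by
              intro x hx
              exact sevKey_of_unknown (fun e => hc (e ▸ hx)) (fun e => hh (e ▸ hx))
                (fun e => hmed (e ▸ hx)) (fun e => hlow (e ▸ hx))
            have hhead := (max?_eq_head?_of_zero hz).symm.trans hm
            cases hs : sevs with
            | nil => exact absurd hs hne
            | cons a t =>
              rw [hs] at hhead
              have ham : a = m := by simpa using hhead
              subst ham
              have hc2 : "critical" ∉ a :: t := hs ▸ hc
              have hh2 : "high" ∉ a :: t := hs ▸ hh
              have hmed2 : "medium" ∉ a :: t := hs ▸ hmed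
              have hlow2 : "low" ∉ a :: t := hs ▸ hlow
              simp only [List.mem_cons, not_or] at hc2 hh2 hmed2 hlow2
              simp [sevLadder, List.find?, hc2.1, hc2.2, hh2.1, hh2.2,
                hmed2.1, hmed2.2, hlow2.1, hlow2.2,
                PySem.List.pyGet?, PySem.List.pyIdx?]
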